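-- pv_equiv track=rewrite | github.com/jazx12345-droid/compliant-bot | digest.py | _group_by_jurisdiction
-- ===== SOURCE A (Python) =====
-- JURISDICTION_ORDER = ["MY", "MY-LABUAN", "HK", "US"]
--
-- def _group_by_jurisdiction(items: list[dict]) -> dict[str, list[dict]]:
--     groups: dict[str, list[dict]] = {}
--     for item in items:
--         j = item.get("jurisdiction") or "Other"
--         groups.setdefault(j, []).append(item)
--     # Sort jurisdictions in preferred order; unknown ones go last alphabetically
--     ordered: dict[str, list[dict]] = {}
--     for j in JURISDICTION_ORDER:
--         if j in groups:
--             ordered[j] = groups.pop(j)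
--     for j in sorted(groups):
--         ordered[j] = groups[j]
--     return ordered
-- ===== SOURCE B (Python) =====
-- JURISDICTION_ORDER = ["MY", "MY-LABUAN", "HK", "US"]
--
-- def _group_by_jurisdiction(items):
--     groups = {}
--     for item in items:
--         j = item.get("jurisdiction") or "Other"
--         groups.setdefault(j, []).append(item)
--     n = len(JURISDICTION_ORDER)
--     keys = sorted(groups, key=lambda k: (JURISDICTION_ORDER.index(k) if k in JURISDICTION_ORDER else n, k))
--     return {k: groups[k] for k in keys}
-- ===== Notes on version B (the rewrite author's own statement) =====
-- stated objective: idiomatic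
-- what changed: Replaces the two ordering loops (pop preferred keys in list order, then append remaining keys sorted) with a single sorted() call over the grouped keys using the composite key (preference rank, key), unknown keys sharing the max rank so they tie-break alphabetically.
import Mathlib
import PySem

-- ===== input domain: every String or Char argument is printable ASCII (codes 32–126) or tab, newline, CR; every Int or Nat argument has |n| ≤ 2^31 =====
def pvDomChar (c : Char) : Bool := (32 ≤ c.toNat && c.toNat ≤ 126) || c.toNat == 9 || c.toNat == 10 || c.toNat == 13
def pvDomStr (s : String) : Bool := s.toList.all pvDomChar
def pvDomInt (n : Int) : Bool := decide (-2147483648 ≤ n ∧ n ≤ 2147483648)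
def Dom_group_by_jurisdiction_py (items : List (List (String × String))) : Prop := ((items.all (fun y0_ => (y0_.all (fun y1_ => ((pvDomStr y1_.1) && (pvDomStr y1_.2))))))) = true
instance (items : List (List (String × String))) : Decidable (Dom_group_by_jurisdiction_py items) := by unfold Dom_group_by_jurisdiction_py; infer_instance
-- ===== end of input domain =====

-- B replaces A's two ordering loops by one keyed sort (idiomatic); return value only, A mutates no argument.

-- JURISDICTION_ORDER (module constant, used by both versions)
def pvJurOrder : List String := ["MY", "MY-LABUAN", "HK", "US"]

-- item.get("jurisdiction") or "Other"  (missing key or falsy "" → "Other"); shared verbatim by A and B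
def pvGetJur (item : List (String × String)) : String :=
  match (PySem.Dict.mk item).get? "jurisdiction" with
  | some v => if v = "" then "Other" else v
  | none => "Other"

-- the grouping loop, textually identical in A and B:
-- groups = {}; for item in items: groups.setdefault(j, []).append(item)
def pvGroups (items : List (List (String × String))) :
    PySem.Dict String (List (List (String × String))) :=
  items.foldl (fun d it => d.modify (pvGetJur it) [] (fun xs => xs ++ [it])) PySem.Dict.empty

-- ===== PORT A =====
def group_by_jurisdiction_py (items : List (List (String × String))) :
    List (String × List (List (String × String))) :=
  let groups := pvGroups items
  -- for j in JURISDICTION_ORDER: if j in groups: ordered[j] = groups.pop(j)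
  let s := pvJurOrder.foldl
    (fun (s : PySem.Dict String (List (List (String × String))) ×
              PySem.Dict String (List (List (String × String)))) j =>
      if s.2.contains j then (s.1.insert j (s.2.getD j []), s.2.erase j) else s)
    (PySem.Dict.empty, groups)
  -- for j in sorted(groups): ordered[j] = groups[j]
  let ordered := (PySem.List.sorted s.2.keys (fun k => k)).foldl
    (fun o j => o.insert j (s.2.getD j [])) s.1
  ordered.items

-- ===== PORT B =====
-- (JURISDICTION_ORDER.index(k) if k in JURISDICTION_ORDER else n)
def pvRank (k : String) : Int :=
  if pvJurOrder.contains k then ((PySem.List.index? pvJurOrder k).getD 0 : Nat)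
  else (pvJurOrder.length : Int)

def group_by_jurisdiction_py_alt (items : List (List (String × String))) :
    List (String × List (List (String × String))) :=
  let groups := pvGroups items
  -- keys = sorted(groups, key=lambda k: (rank, k))
  let keys := PySem.List.sorted2 groups.keys pvRank (fun k => k)
  -- {k: groups[k] for k in keys}
  (keys.foldl (fun o k => o.insert k (groups.getD k [])) PySem.Dict.empty).items

-- ===== PRECONDITION & SPEC =====
def Spec_group_by_jurisdiction_py (items : List (List (String × String))) (out : List (String × List (List (String × String)))) : Prop := out = group_by_jurisdiction_py_alt items
instance (items : List (List (String × String))) (out : List (String × List (List (String × String)))) : Decidable (Spec_group_by_jurisdiction_py items out) := by unfold Spec_group_by_jurisdiction_py; infer_instance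

-- ===== CLAIM (what is proved, stated in full; the proofs are below) =====
def Claim_equal_group_by_jurisdiction_py : Prop := ∀ (items : List (List (String × String))), Dom_group_by_jurisdiction_py items → Spec_group_by_jurisdiction_py items (group_by_jurisdiction_py items)

-- ===== LEMMAS AND PROOFS =====

-- find? through a filter that keeps everything the sought predicate implies
theorem pv_find?_filter {α : Type} (l : List α) (p q : α → Bool)
    (h : ∀ x, p x = true → q x = true) :
    (l.filter q).find? p = l.find? p := by
  induction l with
  | nil => rfl
  | cons a l ih =>
    by_cases hp : p a = true
    · simp [h a hp, hp]
    · by_cases hq : q a = true <;> simp [hq, hp, ih]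

theorem pv_any_filter {α : Type} (l : List α) (p q : α → Bool)
    (h : ∀ x, p x = true → q x = true) :
    (l.filter q).any p = l.any p := by
  induction l with
  | nil => rfl
  | cons a l ih =>
    by_cases hp : p a = true
    · simp [h a hp, hp]
    · by_cases hq : q a = true <;> simp [hq, hp, ih]

theorem pv_map_fst_filter {ν : Type} (l : List (String × ν)) (q : String → Bool) :
    ((l.filter (fun p => q p.1)).map (fun p => p.1)) = (l.map (fun p => p.1)).filter q := by
  induction l with
  | nil => rfl
  | cons a l ih => by_cases hq : q a.1 = true <;> simp [hq, ih]

theorem pv_contains_keys {ν : Type} (d : PySem.Dict String ν) (k : String) :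
    d.contains k = d.keys.contains k := by
  rw [PySem.Dict.contains_eq_decide_mem_keys]; simp

-- the pop loop of A, in closed form
theorem pv_loop1 (pref : List String) (hnd : pref.Nodup)
    (o g : PySem.Dict String (List (List (String × String)))) :
    pref.foldl
      (fun (s : PySem.Dict String (List (List (String × String))) ×
                PySem.Dict String (List (List (String × String)))) j =>
        if s.2.contains j then (s.1.insert j (s.2.getD j []), s.2.erase j) else s)
      (o, g)
    = (pref.foldl (fun o j => if g.contains j then o.insert j (g.getD j []) else o) o,
       PySem.Dict.mk (g.items.filter (fun p => !(pref.contains p.1)))) := by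
  induction pref generalizing o g with
  | nil => simp
  | cons j pref ih =>
    obtain ⟨hj, hnd⟩ := List.nodup_cons.mp hnd
    simp only [List.foldl_cons]
    by_cases hc : g.contains j = true
    · rw [if_pos hc, ih hnd]
      rw [Prod.mk.injEq]
      constructor
      · rw [if_pos hc]
        apply PySem.List.foldl_congr_mem
        intro acc x hx
        have hxj : x ≠ j := fun e => hj (e ▸ hx)
        have hcont : (g.erase j).contains x = g.contains x := by
          simp only [PySem.Dict.contains, PySem.Dict.erase]
          exact pv_any_filter _ _ _ (by
            intro p hp
            simp only [beq_iff_eq] at hp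
            simp [hp, hxj])
        have hgetD : (g.erase j).getD x [] = g.getD x [] := by
          simp only [PySem.Dict.getD, PySem.Dict.get?, PySem.Dict.erase]
          rw [pv_find?_filter]
          intro p hp
          simp only [beq_iff_eq] at hp
          simp [hp, hxj]
        rw [hcont, hgetD]
      · simp only [PySem.Dict.erase, List.filter_filter]
        congr 1
        apply List.filter_congr
        intro p _
        by_cases hpj : p.1 = j <;> simp [hpj]
    · rw [if_neg hc, ih hnd]
      rw [Prod.mk.injEq]
      constructor
      · rw [if_neg hc]
      · congr 1
        apply List.filter_congr
        intro p hp
        have : ¬ p.1 = j := by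
          intro e
          apply hc
          simp only [PySem.Dict.contains, List.any_eq_true]
          exact ⟨p, hp, by simp [e]⟩
        simp [this]

theorem pvRank_of_not_mem {k : String} (h : k ∉ pvJurOrder) : pvRank k = 4 := by
  simp [pvRank, h]; rfl

theorem pvRank_lt_of_mem {k : String} (h : k ∈ pvJurOrder) : pvRank k < 4 := by
  simp only [pvJurOrder, List.mem_cons, List.not_mem_nil, or_false] at h
  rcases h with rfl|rfl|rfl|rfl <;> decide

theorem pv_sorted2_eq_sorted_lex (K : List String) :
    PySem.List.sorted2 K pvRank (fun k => k)
    = PySem.List.sorted K (fun k => toLex (pvRank k, k)) := by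
  have hfun : (fun (a b : String) =>
        decide (pvRank a < pvRank b) || (!decide (pvRank b < pvRank a) && decide (a < b)))
      = (fun a b => decide (toLex (pvRank a, a) < toLex (pvRank b, b))) := by
    funext a b
    rcases lt_trichotomy (pvRank a) (pvRank b) with h|h|h
    · simp [Prod.Lex.lt_iff, h]
    · simp [Prod.Lex.lt_iff, h]
    · simp only [Prod.Lex.lt_iff]
      have h1 : ¬ pvRank a < pvRank b := not_lt_of_gt h
      have h2 : pvRank a ≠ pvRank b := ne_of_gt h
      simp [h1, h2]
      intro h'
      exact absurd h' (not_le_of_gt h)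
  rw [PySem.List.sorted_eq_foldl_insertBy]
  show List.foldl (fun acc x => PySem.List.insertBy (fun a b =>
        decide (pvRank a < pvRank b) || (!decide (pvRank b < pvRank a) && decide (a < b))) x acc) [] K = _
  rw [hfun]

theorem pvJO_pairwise :
    List.Pairwise (fun a b => toLex (pvRank a, a) < toLex (pvRank b, b)) pvJurOrder := by
  have h : List.Pairwise (fun a b => pvRank a < pvRank b) pvJurOrder := by decide
  exact h.imp (fun hab => Prod.Lex.lt_iff.mpr (Or.inl hab))

theorem pv_sort_split (K : List String) (hK : K.Nodup) :
    PySem.List.sorted2 K pvRank (fun k => k)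
    = pvJurOrder.filter (fun j => K.contains j)
      ++ PySem.List.sorted (K.filter (fun k => !(pvJurOrder.contains k))) (fun k => k) := by
  rw [pv_sorted2_eq_sorted_lex]
  set rest := K.filter (fun k => !(pvJurOrder.contains k)) with hrest
  have hrest_nodup : rest.Nodup := hK.filter _
  have hsperm : (PySem.List.sorted rest (fun k => k)).Perm rest := PySem.List.sorted_perm _ _ _
  have hrest_mem : ∀ b ∈ PySem.List.sorted rest (fun k => k), b ∉ pvJurOrder := by
    intro b hb
    have := hsperm.mem_iff.mp hb
    rw [hrest] at this
    simp only [List.mem_filter, Bool.not_eq_true'] at this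
    simpa using this.2
  apply PySem.List.sorted_eq_of_perm_of_pairwise_lt
  · have h1 : (pvJurOrder.filter (fun j => K.contains j)).Perm
        (K.filter (fun k => pvJurOrder.contains k)) := by
      apply List.perm_of_nodup_nodup_toFinset_eq ((by decide : pvJurOrder.Nodup).filter _) (hK.filter _)
      ext a
      simp [and_comm]
    exact (List.Perm.append h1 hsperm).trans (List.filter_append_perm _ K)
  · rw [List.pairwise_append]
    refine ⟨?_, ?_, ?_⟩
    · exact pvJO_pairwise.sublist List.filter_sublist
    · have hnd : (PySem.List.sorted rest (fun k => k)).Nodup := hsperm.symm.nodup hrest_nodup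
      have hle := PySem.List.sorted_pairwise rest (fun k => k)
      have hlt : (PySem.List.sorted rest (fun k => k)).Pairwise (fun a b : String => a < b) :=
        (hle.and hnd).imp (fun hab => lt_of_le_of_ne hab.1 hab.2)
      refine hlt.imp_of_mem ?_
      intro a b ha hb hab
      have ha4 : pvRank a = 4 := pvRank_of_not_mem (hrest_mem a ha)
      have hb4 : pvRank b = 4 := pvRank_of_not_mem (hrest_mem b hb)
      exact Prod.Lex.lt_iff.mpr (Or.inr ⟨by rw [ha4, hb4]; rfl, hab⟩)
    · intro a ha b hb
      have haJ : a ∈ pvJurOrder := (List.mem_filter.mp ha).1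
      have hb4 : pvRank b = 4 := pvRank_of_not_mem (hrest_mem b hb)
      exact Prod.Lex.lt_iff.mpr (Or.inl (by rw [hb4]; exact pvRank_lt_of_mem haJ))


theorem pv_equiv (items : List (List (String × String))) :
    group_by_jurisdiction_py items = group_by_jurisdiction_py_alt items := by
  unfold group_by_jurisdiction_py group_by_jurisdiction_py_alt
  dsimp only
  set G := pvGroups items with hG
  have hK : G.keys.Nodup := by
    rw [hG]
    unfold pvGroups
    exact PySem.Dict.nodup_keys_foldl_modify_key _ _ _ _ _ (by simp [PySem.Dict.empty])
  set rest := G.keys.filter (fun k => !(pvJurOrder.contains k)) with hrestdef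
  have hrest_nodup : rest.Nodup := hK.filter _
  have hsnd : (PySem.List.sorted rest (fun k => k)).Nodup :=
    (PySem.List.sorted_perm rest (fun k => k) false).symm.nodup hrest_nodup
  have hrest_mem : ∀ j ∈ PySem.List.sorted rest (fun k => k), j ∉ pvJurOrder := by
    intro j hj
    have := (PySem.List.sorted_perm rest (fun k => k) false).mem_iff.mp hj
    rw [hrestdef] at this
    simp only [List.mem_filter, Bool.not_eq_true'] at this
    simpa using this.2
  -- A side
  rw [pv_loop1 pvJurOrder (by decide) PySem.Dict.empty G]
  simp only
  have hg2keys : (PySem.Dict.mk (G.items.filter (fun p => !(pvJurOrder.contains p.1)))).keys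
      = rest := by
    rw [PySem.Dict.keys_mk, pv_map_fst_filter G.items (fun b => !(pvJurOrder.contains b)), hrestdef]
    rfl
  rw [hg2keys]
  have ho1 : pvJurOrder.foldl (fun o j => if G.contains j then o.insert j (G.getD j []) else o)
        PySem.Dict.empty
      = (pvJurOrder.filter (fun j => G.contains j)).foldl
          (fun o j => o.insert j (G.getD j [])) PySem.Dict.empty := by
    rw [List.foldl_filter]
  rw [ho1]
  set o1 := (pvJurOrder.filter (fun j => G.contains j)).foldl
      (fun o j => o.insert j (G.getD j [])) PySem.Dict.empty with ho1def
  have ho1items : o1.items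
      = (pvJurOrder.filter (fun j => G.contains j)).map (fun j => (j, G.getD j [])) := by
    rw [ho1def]
    rw [PySem.Dict.items_foldl_insert_fresh _ _ _ _ (by simp [PySem.Dict.contains_empty])
      (by simpa using (by decide : pvJurOrder.Nodup).filter _)]
    rfl
  have hfresh2 : ∀ j ∈ PySem.List.sorted rest (fun k => k), o1.contains j = false := by
    intro j hj
    have hjno : j ∉ pvJurOrder := hrest_mem j hj
    rw [Bool.eq_false_iff]
    intro hc
    apply hjno
    rw [PySem.Dict.contains_iff_mem_keys] at hc
    simp only [PySem.Dict.keys, ho1items, List.map_map] at hc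
    obtain ⟨x, hx, hxe⟩ := List.mem_map.mp hc
    exact hxe ▸ (List.mem_filter.mp hx).1
  rw [PySem.Dict.items_foldl_insert_fresh _ _ _ _ hfresh2 (by simpa using hsnd)]
  rw [ho1items]
  have hgetD2 : (PySem.List.sorted rest (fun k => k)).map
        (fun j => (j, (PySem.Dict.mk (G.items.filter (fun p => !(pvJurOrder.contains p.1)))).getD j []))
      = (PySem.List.sorted rest (fun k => k)).map (fun j => (j, G.getD j [])) := by
    apply List.map_congr_left
    intro j hj
    have hjno : j ∉ pvJurOrder := hrest_mem j hj
    simp only [PySem.Dict.getD, PySem.Dict.get?]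
    rw [pv_find?_filter]
    intro p hp
    simp only [beq_iff_eq] at hp
    simp [hp, hjno]
  rw [hgetD2]
  -- B side
  rw [PySem.Dict.items_foldl_insert_fresh _ _ _ _ (by simp [PySem.Dict.contains_empty])
    (by simpa using (PySem.List.sorted2_perm G.keys pvRank (fun k => k) false).symm.nodup hK)]
  rw [pv_sort_split G.keys hK]
  have hcont : (fun j => G.keys.contains j) = (fun j => G.contains j) := by
    funext j
    rw [pv_contains_keys]
  rw [hcont, List.map_append]
  rfl

-- ===== VERDICT (by name: the statement is the Claim_ definition above) =====
theorem group_by_jurisdiction_py_spec : Claim_equal_group_by_jurisdiction_py := by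
  intro items _
  unfold Spec_group_by_jurisdiction_py
  exact pv_equiv items
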